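-- pv_equiv track=rewrite | github.com/amaanalisayed0412/Plivo_ML | Plivo_ML_assignment/src/rules.py | collapse_spelled_letters
-- ===== SOURCE A (Python) =====
-- def collapse_spelled_letters(s: str) -> str:
--     """
--     Improved: Handles variable-length letter sequences.
--     e.g., 'g m a i l' -> 'gmail' (4 letters)
--     e.g., 's m i t h' -> 'smith' (5 letters)
--     """
--     tokens = s.split()
--     out = []
--     i = 0
--     while i < len(tokens):
--         # Find start of a single-letter sequence
--         if len(tokens[i]) == 1 and tokens[i].isalpha():
--             j = i + 1
--             # Greedily consume all subsequent single letters
--             while j < len(tokens) and len(tokens[j]) == 1 and tokens[j].isalpha():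
--                 j += 1
--
--             # If we found a sequence (e.g., > 2 letters), collapse it
--             if j - i >= 2:
--                 out.append(''.join(tokens[i:j]))
--                 i = j
--             else:
--                 # Not a sequence, just append the token
--                 out.append(tokens[i])
--                 i += 1
--         else:
--             out.append(tokens[i])
--             i += 1
--     return ' '.join(out)
-- ===== SOURCE B (Python) =====
-- def collapse_spelled_letters(s: str) -> str:
--     """One-pass fold: keep a running buffer of consecutive single letters and
--     flush it (joined if >= 2 long, as-is otherwise) whenever a non-letter token
--     or the end of input is reached."""
--     out = []
--     run = []
--     for t in s.split():
--         if len(t) == 1 and t.isalpha():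
--             run.append(t)
--         else:
--             if len(run) >= 2:
--                 out.append(''.join(run))
--             else:
--                 out.extend(run)
--             run = []
--             out.append(t)
--     if len(run) >= 2:
--         out.append(''.join(run))
--     else:
--         out.extend(run)
--     return ' '.join(out)
-- ===== Notes on version B (the rewrite author's own statement) =====
-- stated objective: simpler
-- what changed: Replaced A's two-pointer index scan (outer while with an inner greedy j-loop and slicing) by a single left fold over the tokens that buffers the current run of single letters and flushes it, joined when length >= 2, at each boundary and at the end.
import Mathlib
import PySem

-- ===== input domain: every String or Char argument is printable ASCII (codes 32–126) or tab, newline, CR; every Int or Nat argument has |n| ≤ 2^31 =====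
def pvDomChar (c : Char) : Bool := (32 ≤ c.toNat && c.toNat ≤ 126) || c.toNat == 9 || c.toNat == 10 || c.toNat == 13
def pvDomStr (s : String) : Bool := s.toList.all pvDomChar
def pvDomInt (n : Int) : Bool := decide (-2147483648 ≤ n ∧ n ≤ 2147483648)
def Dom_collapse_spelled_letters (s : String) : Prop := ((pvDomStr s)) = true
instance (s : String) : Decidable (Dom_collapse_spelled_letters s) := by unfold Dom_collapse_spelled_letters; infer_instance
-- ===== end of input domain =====

-- B replaces A's two-pointer index scan by a single left fold that buffers the
-- current run of single letters and flushes it at each boundary (objective: simpler).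

-- ===== PORT A =====
-- shared test: len(t) == 1 and t.isalpha()
def pvSingle (t : String) : Bool := PySem.Str.len t == 1 && PySem.Str.strIsalpha t

-- A's outer while over the remaining tokens; the inner j-scan is the takeWhile
def pvLoopA : List String → List String
  | [] => []
  | t :: rest =>
    if pvSingle t then
      let run := rest.takeWhile pvSingle
      if run.length + 1 ≥ 2 then
        PySem.Str.join "" (t :: run) :: pvLoopA (rest.drop run.length)
      else
        t :: pvLoopA rest
    else
      t :: pvLoopA rest
termination_by l => l.length
decreasing_by
  all_goals (simp only [List.length_drop, List.length_cons]; omega)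

def collapse_spelled_letters (s : String) : String :=
  PySem.Str.join " " (pvLoopA (PySem.Str.split₀ s))

-- ===== PORT B =====
-- flush the buffered run: joined if >= 2 long, as-is otherwise
def pvFlush (out run : List String) : List String :=
  if run.length ≥ 2 then out ++ [PySem.Str.join "" run] else out ++ run

def pvStepB (st : List String × List String) (t : String) : List String × List String :=
  if pvSingle t then (st.1, st.2 ++ [t]) else (pvFlush st.1 st.2 ++ [t], [])

def collapse_spelled_letters_alt (s : String) : String :=
  let st := (PySem.Str.split₀ s).foldl pvStepB ([], [])
  PySem.Str.join " " (pvFlush st.1 st.2)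

-- ===== PRECONDITION & SPEC =====
def Spec_collapse_spelled_letters (s : String) (out : String) : Prop := out = collapse_spelled_letters_alt s
instance (s : String) (out : String) : Decidable (Spec_collapse_spelled_letters s out) := by unfold Spec_collapse_spelled_letters; infer_instance

-- ===== CLAIM (what is proved, stated in full; the proofs are below) =====
def Claim_equal_collapse_spelled_letters : Prop := ∀ (s : String), Dom_collapse_spelled_letters s → Spec_collapse_spelled_letters s (collapse_spelled_letters s)

-- ===== LEMMAS AND PROOFS =====

-- reference recursion: what B's fold computes, read off the token list
def pvF (run : List String) : List String → List String
  | [] => pvFlush [] run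
  | t :: ts => if pvSingle t then pvF (run ++ [t]) ts else pvFlush [] run ++ t :: pvF [] ts

def pvRest : List String → List String
  | [] => []
  | u :: us => u :: pvF [] us

theorem pvFlush_eq_append (out run : List String) :
    pvFlush out run = out ++ pvFlush [] run := by
  unfold pvFlush; split_ifs <;> simp

theorem foldB_eq_F (ts : List String) : ∀ out run,
    pvFlush (ts.foldl pvStepB (out, run)).1 (ts.foldl pvStepB (out, run)).2
      = out ++ pvF run ts := by
  induction ts with
  | nil => intro out run; simpa [pvF] using pvFlush_eq_append out run
  | cons t ts ih =>
    intro out run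
    simp only [List.foldl_cons, pvStepB, pvF]
    by_cases h : pvSingle t
    · simp [h, ih]
    · simp only [h, Bool.false_eq_true, ite_false]
      rw [ih, pvFlush_eq_append out run]
      simp

theorem pvF_run (ts : List String) : ∀ run,
    pvF run ts = pvFlush [] (run ++ ts.takeWhile pvSingle) ++ pvRest (ts.dropWhile pvSingle) := by
  induction ts with
  | nil => intro run; simp [pvF, pvRest]
  | cons t ts ih =>
    intro run
    by_cases h : pvSingle t
    · simp only [pvF, h, ite_true, List.takeWhile_cons_of_pos h, List.dropWhile_cons_of_pos h,
        ih (run ++ [t]), List.append_assoc, List.cons_append, List.nil_append]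
    · simp [pvF, h, List.takeWhile_cons_of_neg, List.dropWhile_cons_of_neg, pvRest]

theorem drop_takeWhile_len {α : Type} (p : α → Bool) : ∀ l : List α,
    l.drop (l.takeWhile p).length = l.dropWhile p := by
  intro l
  induction l with
  | nil => rfl
  | cons a l ih =>
    by_cases hp : p a
    · simp [List.takeWhile_cons_of_pos hp, List.dropWhile_cons_of_pos hp, ih]
    · simp [hp]

theorem dropWhile_head_false {α : Type} (p : α → Bool) : ∀ (l : List α) (u : α) (us : List α),
    l.dropWhile p = u :: us → p u = false := by
  intro l
  induction l with
  | nil => intro u us h; simp at h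
  | cons a l ih =>
    intro u us h
    by_cases hp : p a
    · rw [List.dropWhile_cons_of_pos hp] at h; exact ih u us h
    · rw [List.dropWhile_cons_of_neg (by simp [hp])] at h
      obtain ⟨rfl, -⟩ := List.cons.inj h
      simp [hp]

theorem loopA_eq_F : ∀ n ts, ts.length ≤ n → pvLoopA ts = pvF [] ts := by
  intro n
  induction n with
  | zero => intro ts h; simp at h; simp [h, pvLoopA, pvF, pvFlush]
  | succ n ih =>
    intro ts hlen
    match ts with
    | [] => simp [pvLoopA, pvF, pvFlush]
    | t :: ts =>
      by_cases h : pvSingle t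
      · rw [pvF]
        simp only [h, ite_true]
        rw [pvF_run]
        cases hr : ts.takeWhile pvSingle with
        | nil =>
          have hdw : ts.dropWhile pvSingle = ts := by
            conv_rhs => rw [← List.takeWhile_append_dropWhile (p := pvSingle) (l := ts)]
            rw [hr]; simp
          rw [pvLoopA]
          simp only [h, ite_true, hr, hdw, List.length_nil, List.drop_zero,
            List.append_nil, List.nil_append]
          have hone : ¬ ((1 : Nat) ≥ 2) := by omega
          simp only [Nat.zero_add, hone, ite_false, pvFlush, List.nil_append]
          cases ts with
          | nil => simp [pvLoopA, pvRest]
          | cons u us =>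
            have hu : pvSingle u = false := by
              by_contra hc
              simp only [Bool.not_eq_false] at hc
              rw [List.takeWhile_cons_of_pos hc] at hr; simp at hr
            rw [pvLoopA]
            simp only [hu, Bool.false_eq_true, ite_false, pvRest]
            have := ih us (by simp at hlen ⊢; omega)
            simp [this]
        | cons r rs =>
          rw [pvLoopA]
          simp only [h, ite_true, hr]
          have hge : (r :: rs).length + 1 ≥ 2 := by simp
          simp only [hge, ite_true]
          have hdrop := drop_takeWhile_len pvSingle ts
          rw [hr] at hdrop
          rw [hdrop]
          have hfl : pvFlush [] ([] ++ [t] ++ (r :: rs)) = [PySem.Str.join "" (t :: r :: rs)] := by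
            simp [pvFlush]
          rw [← hr]
          rw [hr, hfl]
          have hdwlen : (ts.dropWhile pvSingle).length ≤ ts.length :=
            List.length_dropWhile_le _ _
          cases hd : ts.dropWhile pvSingle with
          | nil => simp [pvLoopA, pvRest]
          | cons u us =>
            have hu : pvSingle u = false := dropWhile_head_false pvSingle ts u us hd
            rw [pvLoopA]
            simp only [hu, Bool.false_eq_true, ite_false, pvRest]
            have hlt : us.length ≤ n := by
              rw [hd] at hdwlen; simp at hdwlen hlen; omega
            simp [ih us hlt]
      · rw [pvLoopA, pvF]
        simp only [h, Bool.false_eq_true, ite_false]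
        have := ih ts (by simp at hlen; omega)
        simp [this, pvFlush]

-- ===== VERDICT (by name: the statement is the Claim_ definition above) =====
theorem collapse_spelled_letters_spec : Claim_equal_collapse_spelled_letters := by
  intro s _
  show collapse_spelled_letters s =
    PySem.Str.join " " (pvFlush ((PySem.Str.split₀ s).foldl pvStepB ([], [])).1
      ((PySem.Str.split₀ s).foldl pvStepB ([], [])).2)
  unfold collapse_spelled_letters
  rw [foldB_eq_F, loopA_eq_F (PySem.Str.split₀ s).length _ le_rfl]
  simp
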